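-- pv_equiv track=rewrite | github.com/Adamchen566/mahjong_AI | core/fan.py | is_peng_peng_hu
-- ===== SOURCE A (Python) =====
-- def is_peng_peng_hu(hand, melds):
--     """
--     手牌hand为list，melds为副露区list of list，每组副露为list[Tile]。
--     """
--     from collections import Counter
--     all_tiles = list(hand)
--     koutsu_count = 0
--     # 1. 统计副露中的刻子/杠
--     for meld in melds:
--         if len(meld) in (3, 4) and all(t == meld[0] for t in meld):
--             koutsu_count += 1
--         else:
--             return False  # 副露中有顺子或吃，直接不是碰碰胡
--     # 2. 剩余手牌中每次尽量拆刻子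
--     c = Counter(all_tiles)
--     while True:
--         found = False
--         for t, n in c.items():
--             if n >= 3:
--                 c[t] -= 3
--                 koutsu_count += 1
--                 found = True
--                 break
--         if not found:
--             break
--     # 3. 剩下必须只剩1种牌且数量为2（对子），且刻子总数==4
--     rest = [t for t, n in c.items() for _ in range(n) if n > 0]
--     if koutsu_count == 4 and len(rest) == 2 and rest[0] == rest[1]:
--         return True
--     else:
--         return False
-- ===== SOURCE B (Python) =====
-- def is_peng_peng_hu(hand, melds):
--     """Arithmetic reformulation: classify tile counts by n//3 and n%3 instead of
--     greedily peeling triplets and rebuilding the leftover list."""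
--     from collections import Counter
--     koutsu_count = 0
--     for meld in melds:
--         if len(meld) in (3, 4) and all(t == meld[0] for t in meld):
--             koutsu_count += 1
--         else:
--             return False
--     c = Counter(hand)
--     triplets = sum(n // 3 for n in c.values())
--     rems = [n % 3 for n in c.values()]
--     return koutsu_count + triplets == 4 and rems.count(2) == 1 and rems.count(1) == 0
-- ===== Notes on version B (the rewrite author's own statement) =====
-- stated objective: simpler
-- what changed: Replaces the greedy peel-one-triplet-per-scan while-loop over a mutated Counter and the leftover-list reconstruction with a single arithmetic classification: triplets = sum(n//3) and a check that exactly one tile count has remainder 2 and none has remainder 1.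
import Mathlib
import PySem

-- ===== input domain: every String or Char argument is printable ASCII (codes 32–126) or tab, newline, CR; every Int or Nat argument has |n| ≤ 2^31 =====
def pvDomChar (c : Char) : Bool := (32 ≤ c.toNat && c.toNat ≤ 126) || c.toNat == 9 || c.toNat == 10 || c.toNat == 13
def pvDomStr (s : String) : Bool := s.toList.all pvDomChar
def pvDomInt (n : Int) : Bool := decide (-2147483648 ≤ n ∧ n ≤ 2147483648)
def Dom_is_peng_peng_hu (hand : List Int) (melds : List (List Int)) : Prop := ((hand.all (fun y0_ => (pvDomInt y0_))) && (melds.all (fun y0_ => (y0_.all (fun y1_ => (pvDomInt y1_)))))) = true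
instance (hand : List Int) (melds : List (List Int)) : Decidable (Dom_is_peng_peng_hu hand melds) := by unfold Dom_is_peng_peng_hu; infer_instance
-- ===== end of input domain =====

-- B replaces A's greedy peel-one-triplet-per-scan while-loop and leftover-list rebuild by an
-- arithmetic classification of the tile counts (sum of n//3, multiset of n%3); objective: simpler.

-- ===== PORT A =====
-- the meld scan: returns none where Python hits `return False`, else the koutsu count
def pvMeldLoopA : List (List Int) → Int → Option Int
  | [], k => some k
  | meld :: rest, k =>
    if (meld.length == 3 || meld.length == 4) && meld.all (fun t => some t == PySem.List.pyGet? meld 0) then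
      pvMeldLoopA rest (k + 1)
    else none

-- the inner `for t, n in c.items(): if n >= 3: … break` scan
def pvFindKoutsu : List (Int × Int) → Option Int
  | [] => none
  | (t, n) :: rest => if 3 ≤ n then some t else pvFindKoutsu rest

-- the `while True:` peel loop; fuel only makes it total (each peel removes 3 tiles)
def pvPeel : Nat → PySem.Dict Int Int → Int → PySem.Dict Int Int × Int
  | 0, c, k => (c, k)
  | fuel + 1, c, k =>
    match pvFindKoutsu c.items with
    | none => (c, k)
    | some t => pvPeel fuel (c.modify t 0 (fun n => n - 3)) (k + 1)

-- rest = [t for t, n in c.items() for _ in range(n) if n > 0]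
def pvRestOf (items : List (Int × Int)) : List Int :=
  items.flatMap (fun p => (PySem.List.pyRange 0 p.2).filterMap (fun _ => if 0 < p.2 then some p.1 else none))

def is_peng_peng_hu (hand : List Int) (melds : List (List Int)) : Bool :=
  let all_tiles := hand
  match pvMeldLoopA melds 0 with
  | none => false
  | some koutsu0 =>
    let c := PySem.Dict.counter all_tiles
    let fuel := (c.values.map Int.toNat).sum + 1
    let res := pvPeel fuel c koutsu0
    let rest := pvRestOf res.1.items
    res.2 == 4 && rest.length == 2 && (PySem.List.pyGet? rest 0 == PySem.List.pyGet? rest 1)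

-- ===== PORT B =====
def pvMeldLoopB : List (List Int) → Int → Option Int
  | [], k => some k
  | meld :: rest, k =>
    if (meld.length == 3 || meld.length == 4) && meld.all (fun t => some t == PySem.List.pyGet? meld 0) then
      pvMeldLoopB rest (k + 1)
    else none

def is_peng_peng_hu_alt (hand : List Int) (melds : List (List Int)) : Bool :=
  match pvMeldLoopB melds 0 with
  | none => false
  | some koutsu0 =>
    let c := PySem.Dict.counter hand
    let triplets := (c.values.map (fun n => PySem.Int.floordiv n 3)).sum
    let rems := c.values.map (fun n => PySem.Int.mod n 3)
    koutsu0 + triplets == 4 && rems.count 2 == 1 && rems.count 1 == 0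

-- ===== PRECONDITION & SPEC =====
def Spec_is_peng_peng_hu (hand : List Int) (melds : List (List Int)) (out : Bool) : Prop := out = is_peng_peng_hu_alt hand melds
instance (hand : List Int) (melds : List (List Int)) (out : Bool) : Decidable (Spec_is_peng_peng_hu hand melds out) := by unfold Spec_is_peng_peng_hu; infer_instance

-- ===== CLAIM (what is proved, stated in full; the proofs are below) =====
def Claim_equal_is_peng_peng_hu : Prop := ∀ (hand : List Int) (melds : List (List Int)), Dom_is_peng_peng_hu hand melds → Spec_is_peng_peng_hu hand melds (is_peng_peng_hu hand melds)

-- ===== LEMMAS AND PROOFS =====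

theorem meldLoop_eq (melds : List (List Int)) (k : Int) : pvMeldLoopA melds k = pvMeldLoopB melds k := by
  induction melds generalizing k with
  | nil => rfl
  | cons m rest ih =>
    simp only [pvMeldLoopA, pvMeldLoopB]
    split <;> simp [ih]

-- sum over a nodup list where only one entry changes
theorem sum_map_update (l : List Int) (hnd : l.Nodup) (t : Int) (ht : t ∈ l)
    (f g : Int → Int) (hfg : ∀ x, x ≠ t → f x = g x) :
    (l.map f).sum = (l.map g).sum + (f t - g t) := by
  induction l with
  | nil => cases ht
  | cons a l ih =>
    rcases List.mem_cons.mp ht with rfl | hmem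
    · have : ∀ x ∈ l, f x = g x := fun x hx =>
        hfg x (fun h => (List.nodup_cons.mp hnd).1 (h ▸ hx))
      simp [List.map_congr_left this]; ring
    · have hat : a ≠ t := fun h => (List.nodup_cons.mp hnd).1 (h ▸ hmem)
      have := ih (List.nodup_cons.mp hnd).2 hmem
      simp only [List.map_cons, List.sum_cons, this, hfg a hat]; ring

theorem sum_toNat_cast (l : List Int) (h : ∀ x ∈ l, 0 ≤ x) :
    l.sum = ((l.map Int.toNat).sum : Int) := by
  induction l with
  | nil => rfl
  | cons a l ih =>
    simp only [List.map_cons, List.sum_cons, Nat.cast_add,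
      ← ih (fun x hx => h x (List.mem_cons_of_mem _ hx))]
    have := h a (List.mem_cons_self)
    omega

theorem findKoutsu_none (K : List Int) (g : Int → Int) :
    pvFindKoutsu (K.map (fun t => (t, g t))) = none ↔ ∀ t ∈ K, g t < 3 := by
  induction K with
  | nil => simp [pvFindKoutsu]
  | cons a K ih =>
    simp only [List.map_cons, pvFindKoutsu]
    split
    case isTrue h3 =>
      constructor
      · intro hcontra; exact (Option.some_ne_none _ hcontra).elim
      · intro hall; exact absurd (hall a List.mem_cons_self) (by omega)
    case isFalse h3 =>
      rw [ih]; simp only [List.forall_mem_cons]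
      constructor
      · intro hK; exact ⟨by omega, hK⟩
      · intro h'; exact h'.2

theorem findKoutsu_some (K : List Int) (g : Int → Int) (t : Int)
    (h : pvFindKoutsu (K.map (fun t => (t, g t))) = some t) : t ∈ K ∧ 3 ≤ g t := by
  induction K with
  | nil => simp [pvFindKoutsu] at h
  | cons a K ih =>
    simp only [List.map_cons, pvFindKoutsu] at h
    split at h
    · cases h; simp_all
    · have := ih h; tauto

-- main invariant of the peel loop
theorem filterMap_const_some {α β : Type} (t : β) (l : List α) :
    l.filterMap (fun _ => some t) = List.replicate l.length t := by
  induction l with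
  | nil => rfl
  | cons a l ih => simp [ih, List.replicate_succ]

theorem peel_spec (fuel : Nat) : ∀ (c : PySem.Dict Int Int) (k : Int),
    c.keys.Nodup → (∀ t, 0 ≤ c.getD t 0) →
    (c.keys.map (fun t => c.getD t 0)).sum ≤ 3 * fuel →
    (pvPeel fuel c k).1.keys = c.keys ∧
    (∀ t, (pvPeel fuel c k).1.getD t 0 = c.getD t 0 % 3) ∧
    (pvPeel fuel c k).2 = k + (c.keys.map (fun t => c.getD t 0 / 3)).sum := by
  induction fuel with
  | zero =>
    intro c k hnd hpos hsum
    have hz : ∀ t ∈ c.keys, c.getD t 0 = 0 := by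
      intro t ht
      have h1 : c.getD t 0 ≤ (c.keys.map (fun t => c.getD t 0)).sum := by
        apply List.single_le_sum (by simp; intro x _; exact hpos x)
        exact List.mem_map_of_mem ht
      have := hpos t; omega
    refine ⟨rfl, fun t => ?_, ?_⟩
    · show c.getD t 0 = c.getD t 0 % 3
      by_cases ht : t ∈ c.keys
      · rw [hz t ht]; decide
      · have h0 : c.getD t 0 = 0 := by
          apply PySem.Dict.getD_of_not_contains
          rw [← Bool.not_eq_true]
          exact fun hc => ht ((PySem.Dict.contains_iff_mem_keys c t).mp hc)
        rw [h0]; decide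
    · show k = k + (c.keys.map (fun t => c.getD t 0 / 3)).sum
      have h0 : (c.keys.map (fun t => c.getD t 0 / 3)).sum = 0 := by
        apply List.sum_eq_zero; simp only [List.mem_map]
        rintro _ ⟨t, ht, rfl⟩
        rw [hz t ht]; decide
      rw [h0]; ring
  | succ fuel ih =>
    intro c k hnd hpos hsum
    have hitems : c.items = c.keys.map (fun t => (t, c.getD t 0)) :=
      PySem.Dict.items_eq_map_keys c hnd 0
    cases hf : pvFindKoutsu (c.keys.map (fun t => (t, c.getD t 0))) with
    | none =>
      have hred : pvPeel (fuel + 1) c k = (c, k) := by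
        simp only [pvPeel, hitems, hf]
      have hlt := (findKoutsu_none c.keys (fun t => c.getD t 0)).mp hf
      rw [hred]
      refine ⟨rfl, fun t => ?_, ?_⟩
      · show c.getD t 0 = c.getD t 0 % 3
        by_cases ht : t ∈ c.keys
        · have := hpos t; have := hlt t ht
          omega
        · have h0 : c.getD t 0 = 0 := by
            apply PySem.Dict.getD_of_not_contains
            rw [← Bool.not_eq_true]
            exact fun hc => ht ((PySem.Dict.contains_iff_mem_keys c t).mp hc)
          rw [h0]; decide
      · have h0 : (c.keys.map (fun t => c.getD t 0 / 3)).sum = 0 := by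
          apply List.sum_eq_zero; simp only [List.mem_map]
          rintro _ ⟨t, ht, rfl⟩
          have := hpos t; have := hlt t ht
          omega
        show k = k + (c.keys.map (fun t => c.getD t 0 / 3)).sum
        rw [h0]; ring
    | some t =>
      obtain ⟨htK, hge⟩ := findKoutsu_some _ _ _ hf
      set c' := c.modify t 0 (fun n => n - 3) with hc'
      have hred : pvPeel (fuel + 1) c k = pvPeel fuel c' (k + 1) := by
        simp only [pvPeel, hitems, hf, hc']
      have hkeys' : c'.keys = c.keys := by
        rw [hc', PySem.Dict.keys_modify, PySem.Dict.keys_insert_of_contains]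
        exact (PySem.Dict.contains_iff_mem_keys c t).mpr htK
      have hget' : ∀ t', c'.getD t' 0 = if t' = t then c.getD t 0 - 3 else c.getD t' 0 := by
        intro t'; rw [hc', PySem.Dict.getD_modify]
      have hnd' : c'.keys.Nodup := hkeys' ▸ hnd
      have hpos' : ∀ t', 0 ≤ c'.getD t' 0 := by
        intro t'; rw [hget']; split
        · omega
        · exact hpos t'
      have hupd : (c.keys.map (fun x => c'.getD x 0)).sum
          = (c.keys.map (fun x => c.getD x 0)).sum + (c'.getD t 0 - c.getD t 0) := by
        have h := sum_map_update c.keys hnd t htK (fun x => c'.getD x 0) (fun x => c.getD x 0)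
          (fun x hx => by show c'.getD x 0 = c.getD x 0; rw [hget']; simp [hx])
        exact h
      have hsum' : (c'.keys.map (fun x => c'.getD x 0)).sum ≤ 3 * fuel := by
        have hift : c'.getD t 0 = c.getD t 0 - 3 := by
          rw [hget' t]; simp
        rw [hkeys', hupd, hift]
        have h3 : 3 ≤ (c.keys.map (fun x => c.getD x 0)).sum := by
          have h1 : c.getD t 0 ≤ (c.keys.map (fun x => c.getD x 0)).sum := by
            apply List.single_le_sum (by simp; intro x _; exact hpos x)
            exact List.mem_map_of_mem htK
          omega
        push_cast at hsum ⊢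
        omega
      obtain ⟨ihk, ihg, ihs⟩ := ih c' (k + 1) hnd' hpos' hsum'
      rw [hred]
      refine ⟨by rw [ihk, hkeys'], fun t' => ?_, ?_⟩
      · rw [ihg t', hget']
        split
        · subst t'; omega
        · rfl
      · rw [ihs, hkeys']
        have h := sum_map_update c.keys hnd t htK (fun x => c'.getD x 0 / 3) (fun x => c.getD x 0 / 3)
          (fun x hx => by show c'.getD x 0 / 3 = c.getD x 0 / 3; rw [hget']; simp [hx])
        rw [h]
        show k + 1 + ((c.keys.map (fun x => c.getD x 0 / 3)).sum + (c'.getD t 0 / 3 - c.getD t 0 / 3))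
          = k + (c.keys.map (fun x => c.getD x 0 / 3)).sum
        have hift : c'.getD t 0 / 3 = c.getD t 0 / 3 - 1 := by
          rw [hget' t]
          have : (if t = t then c.getD t 0 - 3 else c.getD t 0) = c.getD t 0 - 3 := by simp
          rw [this]; omega
        rw [hift]; ring

-- [t for _ in range(n) if n > 0] = replicate n t for 0 ≤ n
theorem restElem (t n : Int) (h : 0 ≤ n) :
    (PySem.List.pyRange 0 n).filterMap (fun _ => if 0 < n then some t else none)
      = List.replicate n.toNat t := by
  obtain ⟨m, rfl⟩ := Int.eq_ofNat_of_zero_le h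
  rw [PySem.List.pyRange_zero_natCast]
  rcases Nat.eq_zero_or_pos m with rfl | hm
  · simp
  · have hpos : (0 : Int) < m := by exact_mod_cast hm
    simp only [if_pos hpos]
    rw [show ((List.range m).map (fun k : Nat => (k : Int))).filterMap (fun _ => some t)
        = List.replicate ((List.range m).map (fun k : Nat => (k : Int))).length t
      from filterMap_const_some t _]
    simp

-- rest = [a, a] iff exactly one remainder-2 tile and no remainder-1 tile
theorem rest_pair_iff (K : List Int) (r : Int → Nat) (hnd : K.Nodup) (hb : ∀ t ∈ K, r t ≤ 2) :
    (∃ a, K.flatMap (fun t => List.replicate (r t) t) = [a, a]) ↔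
      (K.countP (fun t => r t == 2) = 1 ∧ K.countP (fun t => r t == 1) = 0) := by
  induction K with
  | nil => simp
  | cons a K ih =>
    have hna : a ∉ K := (List.nodup_cons.mp hnd).1
    have hnd' : K.Nodup := (List.nodup_cons.mp hnd).2
    have hb' : ∀ t ∈ K, r t ≤ 2 := fun t ht => hb t (List.mem_cons_of_mem _ ht)
    have hmem : ∀ x, x ∈ K.flatMap (fun t => List.replicate (r t) t) → x ∈ K := by
      intro x hx
      obtain ⟨t, htK, hxt⟩ := List.mem_flatMap.mp hx
      rw [List.eq_of_mem_replicate hxt]; exact htK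
    have hra := hb a List.mem_cons_self
    rw [List.flatMap_cons]
    rcases (by omega : r a = 0 ∨ r a = 1 ∨ r a = 2) with h | h | h
    · rw [h]
      simp only [List.replicate_zero, List.nil_append, List.countP_cons, h]
      simpa using ih hnd' hb'
    · rw [h]
      constructor
      · rintro ⟨x, hx⟩
        simp only [List.replicate_one, List.cons_append, List.nil_append, List.cons.injEq] at hx
        obtain ⟨rfl, hx2⟩ := hx
        exfalso
        apply hna
        apply hmem
        rw [hx2]; exact List.mem_cons_self
      · rintro ⟨-, h1⟩
        exfalso
        simp [h] at h1
    · rw [h]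
      constructor
      · rintro ⟨x, hx⟩
        have hx' : a = x ∧ a = x ∧ K.flatMap (fun t => List.replicate (r t) t) = [] := by
          simpa [List.replicate_succ, List.cons.injEq] using hx
        obtain ⟨rfl, -, hnil⟩ := hx'
        have hall : ∀ t ∈ K, r t = 0 := by
          intro t ht
          have := (List.flatMap_eq_nil_iff.mp hnil) t ht
          simpa using this
        constructor
        · simp only [List.countP_cons, h]
          rw [List.countP_eq_zero.mpr (fun t ht => by simp [hall t ht])]
          decide
        · simp only [List.countP_cons, h]
          rw [List.countP_eq_zero.mpr (fun t ht => by simp [hall t ht])]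
          decide
      · rintro ⟨h2, h1⟩
        simp only [List.countP_cons, h] at h2 h1
        have hK2 : K.countP (fun t => r t == 2) = 0 := by simpa using h2
        have hK1 : K.countP (fun t => r t == 1) = 0 := by simpa using h1
        have hall : ∀ t ∈ K, r t = 0 := by
          intro t ht
          have n2 := List.countP_eq_zero.mp hK2 t ht
          have n1 := List.countP_eq_zero.mp hK1 t ht
          have := hb' t ht
          simp at n1 n2; omega
        have hnil : K.flatMap (fun t => List.replicate (r t) t) = [] :=
          List.flatMap_eq_nil_iff.mpr (fun t ht => by simp [hall t ht])
        exact ⟨a, by simp [List.replicate_succ, hnil]⟩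

-- `len(rest) == 2 and rest[0] == rest[1]` means rest = [a, a]
theorem len2_get_iff (l : List Int) :
    (l.length = 2 ∧ PySem.List.pyGet? l 0 = PySem.List.pyGet? l 1) ↔ ∃ a, l = [a, a] := by
  match l with
  | [] => simp
  | [x] => simp
  | [x, y] =>
    simp [PySem.List.pyGet?, PySem.List.pyIdx?]
    exact eq_comm
  | x :: y :: z :: rest => simp

theorem is_peng_peng_hu_spec : Claim_equal_is_peng_peng_hu := by
  intro hand melds _dom
  unfold Spec_is_peng_peng_hu
  unfold is_peng_peng_hu is_peng_peng_hu_alt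
  rw [← meldLoop_eq]
  cases hm : pvMeldLoopA melds 0 with
  | none => rfl
  | some k0 =>
    simp only []
    set c := PySem.Dict.counter hand with hc
    set K := c.keys with hK
    have hnd : K.Nodup := PySem.Dict.nodup_keys_counter hand
    have hpos : ∀ t, 0 ≤ c.getD t 0 := by
      intro t; rw [hc, PySem.Dict.getD_counter]; positivity
    have hvals : c.values = K.map (fun t => c.getD t 0) :=
      PySem.Dict.values_eq_map_keys c hnd 0
    set fuel := (c.values.map Int.toNat).sum + 1 with hfuel
    have hsum : (K.map (fun t => c.getD t 0)).sum ≤ 3 * fuel := by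
      have hcast : (K.map (fun t => c.getD t 0)).sum
          = (((K.map (fun t => c.getD t 0)).map Int.toNat).sum : Int) := by
        apply sum_toNat_cast
        simp only [List.mem_map]
        rintro _ ⟨t, -, rfl⟩
        exact hpos t
      rw [hfuel, hvals, hcast, List.map_map]
      omega
    obtain ⟨hk1, hk2, hk3⟩ := peel_spec fuel c k0 hnd hpos hsum
    rw [← hK] at hk1 hk3
    set P := pvPeel fuel c k0 with hP
    have hitems' : P.1.items = K.map (fun t => (t, c.getD t 0 % 3)) := by
      rw [PySem.Dict.items_eq_map_keys P.1 (hk1 ▸ hnd) 0, hk1]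
      exact List.map_congr_left (fun t _ => by rw [hk2 t])
    -- the rest list in replicate form
    set r : Int → Nat := fun t => (c.getD t 0 % 3).toNat with hr
    have hmodpos : ∀ t, 0 ≤ c.getD t 0 % 3 := fun t => Int.emod_nonneg _ (by norm_num)
    have hrest : pvRestOf P.1.items = K.flatMap (fun t => List.replicate (r t) t) := by
      rw [pvRestOf, hitems', List.flatMap_map]
      apply List.flatMap_congr
      intro t _
      exact restElem t _ (hmodpos t)
    have hrb : ∀ t ∈ K, r t ≤ 2 := by
      intro t _
      simp only [hr]
      have h1 := hmodpos t
      have h2 := Int.emod_lt_of_pos (c.getD t 0) (by norm_num : (0:Int) < 3)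
      omega
    -- B-side sums and counts in key form
    have htrip : (c.values.map (fun n => PySem.Int.floordiv n 3)).sum
        = (K.map (fun t => c.getD t 0 / 3)).sum := by
      rw [hvals, List.map_map]
      apply congrArg
      apply List.map_congr_left
      intro t _
      exact PySem.Int.floordiv_eq_ediv_of_pos (by norm_num)
    have hrems : ∀ (v : Int), ((c.values.map (fun n => PySem.Int.mod n 3)).count v)
        = K.countP (fun t => c.getD t 0 % 3 == v) := by
      intro v
      rw [hvals, List.map_map, List.count_eq_countP, List.countP_map]
      apply List.countP_congr
      intro t _
      simp
    rw [Bool.eq_iff_iff]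
    simp only [Bool.and_eq_true, beq_iff_eq]
    rw [hrest, hk3, htrip, hrems 2, hrems 1]
    have hc2 : K.countP (fun t => r t == 2) = K.countP (fun t => c.getD t 0 % 3 == 2) := by
      apply List.countP_congr
      intro t _
      have hm := hmodpos t
      simp only [hr, beq_iff_eq]
      constructor <;> (intro ht; omega)
    have hc1 : K.countP (fun t => r t == 1) = K.countP (fun t => c.getD t 0 % 3 == 1) := by
      apply List.countP_congr
      intro t _
      have hm := hmodpos t
      simp only [hr, beq_iff_eq]
      constructor <;> (intro ht; omega)
    rw [and_assoc, and_assoc, len2_get_iff, rest_pair_iff K r hnd hrb, hc2, hc1]
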